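-- pv_equiv track=rewrite | github.com/hjlim7831/algorithm | 프로그래머스/unrated/133502. 햄버거 만들기/햄버거 만들기.py | solution
-- ===== SOURCE A (Python) =====
-- def solution(ingredient):
--     cnt = 0
--     stack = []
--     for ing in ingredient:
--         stack.append(ing)
--         if len(stack) >= 4 and stack[-1] == 1 and stack[-2] == 3 and stack[-3] == 2 and stack[-4] == 1:
--             cnt += 1
--             stack.pop()
--             stack.pop()
--             stack.pop()
--             stack.pop()
--
--     return cnt
-- ===== SOURCE B (Python) =====
-- def _find(lst):
--     for i in range(len(lst) - 3):
--         if lst[i:i+4] == [1, 2, 3, 1]: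
--             return i
--     return None
--
-- def solution(ingredient):
--     lst = list(ingredient)
--     cnt = 0
--     while True:
--         i = _find(lst)
--         if i is None:
--             return cnt
--         del lst[i:i+4]
--         cnt += 1
-- ===== Notes on version B (the rewrite author's own statement) =====
-- stated objective: alternative
-- what changed: Replaced the single-pass stack simulation by repeated leftmost-occurrence search and in-place deletion of the four-element hamburger run until no occurrence remains.
import Mathlib
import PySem

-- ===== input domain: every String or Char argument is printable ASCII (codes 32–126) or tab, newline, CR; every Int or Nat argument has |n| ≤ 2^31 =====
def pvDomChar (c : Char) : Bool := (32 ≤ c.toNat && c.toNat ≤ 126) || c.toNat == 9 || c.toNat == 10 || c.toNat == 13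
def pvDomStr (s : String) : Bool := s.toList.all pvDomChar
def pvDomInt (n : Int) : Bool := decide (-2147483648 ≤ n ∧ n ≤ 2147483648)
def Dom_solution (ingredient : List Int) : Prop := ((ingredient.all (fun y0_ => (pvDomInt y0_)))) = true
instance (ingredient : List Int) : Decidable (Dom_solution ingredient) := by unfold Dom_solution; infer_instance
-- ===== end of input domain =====

-- B replaces A's one-pass stack simulation by repeated leftmost-match search and deletion
-- of the [1,2,3,1] run (objective: alternative; return values proved equal).

-- ===== PORT A =====
-- one iteration of A's for-loop: append, then conditionally count and pop four times
def solStep (st : Int × List Int) (ing : Int) : Int × List Int :=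
  let stack := st.2 ++ [ing]
  if 4 ≤ stack.length ∧ PySem.List.pyGet? stack (-1) = some 1 ∧
      PySem.List.pyGet? stack (-2) = some 3 ∧ PySem.List.pyGet? stack (-3) = some 2 ∧
      PySem.List.pyGet? stack (-4) = some 1 then
    (st.1 + 1, stack.dropLast.dropLast.dropLast.dropLast)
  else
    (st.1, stack)

def solution (ingredient : List Int) : Int :=
  (ingredient.foldl solStep (0, [])).1

-- ===== PORT B =====
-- Source B's _find: index of the leftmost contiguous run [1,2,3,1], scanning left to right
def findPat : List Int → Option Nat
  | a :: b :: c :: d :: rest =>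
      if a = 1 ∧ b = 2 ∧ c = 3 ∧ d = 1 then some 0
      else (findPat (b :: c :: d :: rest)).map (· + 1)
  | _ => none

-- cited by altLoop's decreasing_by
theorem findPat_some_le (l : List Int) (i : Nat) (h : findPat l = some i) :
    i + 4 ≤ l.length := by
  induction l using findPat.induct generalizing i with
  | case1 a b c d rest hg =>
      rw [findPat, if_pos hg] at h
      cases h; simp
  | case2 a b c d rest hg ih =>
      rw [findPat, if_neg hg] at h
      cases hfp : findPat (b :: c :: d :: rest) with
      | none => rw [hfp] at h; simp at h
      | some j =>
          rw [hfp] at h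
          simp only [Option.map_eq_some_iff, Option.some.injEq] at h
          obtain ⟨j', hj', hji⟩ := h
          cases hj'
          have := ih j hfp
          simp only [List.length_cons] at this ⊢
          omega
  | case3 l h1 => cases l with
      | nil => simp [findPat] at h
      | cons x xs => cases xs with
        | nil => simp [findPat] at h
        | cons y ys => cases ys with
          | nil => simp [findPat] at h
          | cons z zs => cases zs with
            | nil => simp [findPat] at h
            | cons w ws => exact absurd rfl (h1 x y z w ws)

-- Source B's outer while-loop: delete the found run, count, repeat
def altLoop (l : List Int) : Int :=
  match h : findPat l with
  | none => 0
  | some i => 1 + altLoop (l.take i ++ l.drop (i + 4))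
termination_by l.length
decreasing_by
  have := findPat_some_le l i h
  simp only [List.length_append, List.length_take, List.length_drop]
  omega

def solution_alt (ingredient : List Int) : Int := altLoop ingredient

-- ===== PRECONDITION & SPEC =====
def Spec_solution (ingredient : List Int) (out : Int) : Prop := out = solution_alt ingredient
instance (ingredient : List Int) (out : Int) : Decidable (Spec_solution ingredient out) := by unfold Spec_solution; infer_instance

-- ===== CLAIM (what is proved, stated in full; the proofs are below) =====
def Claim_equal_solution : Prop := ∀ (ingredient : List Int), Dom_solution ingredient → Spec_solution ingredient (solution ingredient)

-- ===== LEMMAS AND PROOFS =====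

-- pattern occurrence at position i
def occ (l : List Int) (i : Nat) : Prop := (l.drop i).take 4 = [1, 2, 3, 1]

theorem occ_length {l : List Int} {i : Nat} (h : occ l i) : i + 4 ≤ l.length := by
  have := congrArg List.length h
  simp [List.length_take, List.length_drop] at this
  omega

theorem findPat_none_iff (l : List Int) : findPat l = none ↔ ∀ i, ¬ occ l i := by
  induction l using findPat.induct with
  | case1 a b c d rest hg =>
      rw [findPat, if_pos hg]
      obtain ⟨h1, h2, h3, h4⟩ := hg
      subst h1 h2 h3 h4
      constructor
      · intro h; simp at h
      · intro h; exact absurd (by simp [occ]) (h 0)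
  | case2 a b c d rest hg ih =>
      rw [findPat, if_neg hg]
      constructor
      · intro h i hocc
        cases i with
        | zero =>
            simp [occ] at hocc
            exact hg ⟨hocc.1, hocc.2.1, hocc.2.2.1, hocc.2.2.2⟩
        | succ j =>
            have hnone : findPat (b :: c :: d :: rest) = none := by
              cases hfp : findPat (b :: c :: d :: rest) with
              | none => rfl
              | some k => rw [hfp] at h; simp at h
            exact (ih.mp hnone) j (by simpa [occ] using hocc)
      · intro h
        have : findPat (b :: c :: d :: rest) = none := by
          apply ih.mpr
          intro j hj
          exact (h (j + 1)) (by simpa [occ] using hj)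
        simp [this]
  | case3 l h1 =>
      have hlen : l.length < 4 := by
        cases l with
        | nil => simp
        | cons x xs => cases xs with
          | nil => simp
          | cons y ys => cases ys with
            | nil => simp
            | cons z zs => cases zs with
              | nil => simp
              | cons w ws => exact absurd rfl (h1 x y z w ws)
      constructor
      · intro _ i hocc
        have := occ_length hocc; omega
      · intro _
        cases l with
        | nil => rfl
        | cons x xs => cases xs with
          | nil => rfl
          | cons y ys => cases ys with
            | nil => rfl
            | cons z zs => cases zs with
              | nil => rfl
              | cons w ws => exact absurd rfl (h1 x y z w ws)

theorem findPat_some_occ {l : List Int} {i : Nat} (h : findPat l = some i) :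
    occ l i ∧ ∀ j < i, ¬ occ l j := by
  induction l using findPat.induct generalizing i with
  | case1 a b c d rest hg =>
      rw [findPat, if_pos hg] at h
      cases h
      obtain ⟨h1, h2, h3, h4⟩ := hg
      subst h1 h2 h3 h4
      exact ⟨by simp [occ], by omega⟩
  | case2 a b c d rest hg ih =>
      rw [findPat, if_neg hg] at h
      cases hfp : findPat (b :: c :: d :: rest) with
      | none => rw [hfp] at h; simp at h
      | some k =>
          rw [hfp] at h; simp at h
          subst h
          obtain ⟨hk, hmin⟩ := ih hfp
          refine ⟨by simpa [occ] using hk, ?_⟩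
          intro j hj hocc
          cases j with
          | zero =>
              simp [occ] at hocc
              exact hg ⟨hocc.1, hocc.2.1, hocc.2.2.1, hocc.2.2.2⟩
          | succ m =>
              exact hmin m (by omega) (by simpa [occ] using hocc)
  | case3 l h1 => cases l with
      | nil => simp [findPat] at h
      | cons x xs => cases xs with
        | nil => simp [findPat] at h
        | cons y ys => cases ys with
          | nil => simp [findPat] at h
          | cons z zs => cases zs with
            | nil => simp [findPat] at h
            | cons w ws => exact absurd rfl (h1 x y z w ws)

theorem findPat_eq_some {l : List Int} {i : Nat} (hocc : occ l i)
    (hmin : ∀ j < i, ¬ occ l j) : findPat l = some i := by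
  cases hfp : findPat l with
  | none => exact absurd hocc ((findPat_none_iff l).mp hfp i)
  | some k =>
      obtain ⟨hk, hkmin⟩ := findPat_some_occ hfp
      rcases Nat.lt_trichotomy k i with h | h | h
      · exact absurd hk (hmin k h)
      · rw [h]
      · exact absurd hocc (hkmin i h)

theorem altLoop_none {l : List Int} (h : findPat l = none) : altLoop l = 0 := by
  rw [altLoop]; split <;> simp_all

theorem altLoop_some {l : List Int} {i : Nat} (h : findPat l = some i) :
    altLoop l = 1 + altLoop (l.take i ++ l.drop (i + 4)) := by
  rw [altLoop]; split <;> simp_all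

-- occurrences strictly inside a prefix are unaffected by the suffix
theorem occ_append {s : List Int} (t : List Int) {i : Nat} (h : i + 4 ≤ s.length) :
    occ (s ++ t) i ↔ occ s i := by
  unfold occ
  rw [List.drop_append_of_le_length (by omega),
      List.take_append_of_le_length (by simp [List.length_drop]; omega)]

-- the guard of A's if, re-expressed as "the last four elements are 1,2,3,1"
theorem guard_iff (l : List Int) (h : 4 ≤ l.length) :
    (PySem.List.pyGet? l (-1) = some 1 ∧ PySem.List.pyGet? l (-2) = some 3 ∧
     PySem.List.pyGet? l (-3) = some 2 ∧ PySem.List.pyGet? l (-4) = some 1) ↔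
    l.drop (l.length - 4) = [1, 2, 3, 1] := by
  rw [PySem.List.pyGet?_neg_ofNat l 1 (by omega) (by omega),
      PySem.List.pyGet?_neg_ofNat l 2 (by omega) (by omega),
      PySem.List.pyGet?_neg_ofNat l 3 (by omega) (by omega),
      PySem.List.pyGet?_neg_ofNat l 4 (by omega) (by omega)]
  constructor
  · intro ⟨h1, h2, h3, h4⟩
    apply List.ext_getElem?
    intro i
    match i with
    | 0 => simpa [List.getElem?_drop] using h4
    | 1 => simpa [List.getElem?_drop, Nat.sub_add_eq_max, show l.length - 4 + 1 = l.length - 3 by omega] using h3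
    | 2 => simpa [List.getElem?_drop, show l.length - 4 + 2 = l.length - 2 by omega] using h2
    | 3 => simpa [List.getElem?_drop, show l.length - 4 + 3 = l.length - 1 by omega] using h1
    | (n + 4) =>
        rw [List.getElem?_eq_none (by simp [List.length_drop]; omega),
            List.getElem?_eq_none (by simp)]
  · intro hd
    have key : ∀ k : Nat, (l.drop (l.length - 4))[k]? = ([(1:Int), 2, 3, 1])[k]? := by
      intro k; rw [hd]
    have g0 := key 0; have g1 := key 1; have g2 := key 2; have g3 := key 3
    rw [List.getElem?_drop] at g0 g1 g2 g3
    refine ⟨?_, ?_, ?_, ?_⟩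
    · simpa [show l.length - 4 + 3 = l.length - 1 by omega] using g3
    · simpa [show l.length - 4 + 2 = l.length - 2 by omega] using g2
    · simpa [show l.length - 4 + 1 = l.length - 3 by omega] using g1
    · simpa using g0

theorem dropLast4_concat (q : List Int) (a b c d : Int) :
    (q ++ [a, b, c, d]).dropLast.dropLast.dropLast.dropLast = q := by
  have h : ∀ (xs : List Int) (x : Int), (xs ++ [x]).dropLast = xs := by
    intro xs x; simp
  rw [show q ++ [a, b, c, d] = ((q ++ [a] ++ [b]) ++ [c]) ++ [d] by simp,
      h, h, h, h]

-- main loop invariant: while the stack contains no pattern, A's remaining fold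
-- computes exactly B's count of the stack followed by the remaining input
theorem loop_eq (rest : List Int) : ∀ (stack : List Int) (cnt : Int),
    findPat stack = none →
    (List.foldl solStep (cnt, stack) rest).1 = cnt + altLoop (stack ++ rest) := by
  induction rest with
  | nil =>
      intro stack cnt h
      simp [altLoop_none h]
  | cons ing rest' ih =>
      intro stack cnt h
      have hs := (findPat_none_iff stack).mp h
      rw [List.foldl_cons]
      by_cases hg : 4 ≤ (stack ++ [ing]).length ∧
          PySem.List.pyGet? (stack ++ [ing]) (-1) = some 1 ∧
          PySem.List.pyGet? (stack ++ [ing]) (-2) = some 3 ∧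
          PySem.List.pyGet? (stack ++ [ing]) (-3) = some 2 ∧
          PySem.List.pyGet? (stack ++ [ing]) (-4) = some 1
      · -- the pattern just completed at the top of the stack
        obtain ⟨hlen, hrest⟩ := hg
        have hdrop : (stack ++ [ing]).drop ((stack ++ [ing]).length - 4) = [1, 2, 3, 1] :=
          (guard_iff _ hlen).mp hrest
        set s' := stack ++ [ing] with hs'
        have hq : s'.take (s'.length - 4) ++ [1, 2, 3, 1] = s' := by
          conv_rhs => rw [← List.take_append_drop (s'.length - 4) s', hdrop]
        set q := s'.take (s'.length - 4) with hqdef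
        have hqlen : q.length = s'.length - 4 := by
          simp [hqdef, List.length_take]
        have hslen : s'.length = stack.length + 1 := by simp [hs']
        -- A's step
        have hstep : solStep (cnt, stack) ing = (cnt + 1, q) := by
          simp only [solStep]
          rw [if_pos ⟨hlen, hrest⟩]
          rw [← hs', ← hq]
          rw [dropLast4_concat]
        -- q contains no pattern
        have hqnone : findPat q = none := by
          apply (findPat_none_iff q).mpr
          intro i hi
          have hle : i + 4 ≤ q.length := occ_length hi
          have h1 : occ s' i := by
            rw [← hq]; exact (occ_append _ (by omega)).mpr hi
          have h2 : occ stack i := by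
            rw [hs'] at h1
            exact (occ_append _ (by omega)).mp h1
          exact hs i h2
        -- the leftmost pattern of the whole remaining list sits at position q.length
        have hfind : findPat (s' ++ rest') = some q.length := by
          apply findPat_eq_some
          · unfold occ
            rw [← hq, List.append_assoc, List.drop_left, List.take_append_of_le_length (by simp)]
            simp
          · intro j hj hocc
            rw [hqlen] at hj
            have hocc' : occ s' j := (occ_append rest' (by omega)).mp hocc
            have : occ stack j := (occ_append [ing] (by omega)).mp (by rwa [hs'] at hocc')
            exact hs j this
        have halt : altLoop (s' ++ rest') = 1 + altLoop (q ++ rest') := by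
          rw [altLoop_some hfind]
          congr 1
          rw [List.take_append_of_le_length (by rw [← hq]; simp),
              show q.length + 4 = (q ++ [(1:Int), 2, 3, 1]).length by simp,
              hq, List.drop_left]
          simp [hqdef]
        rw [hstep, ih q (cnt + 1) hqnone, show stack ++ ing :: rest' = s' ++ rest' by simp [hs'],
            halt]
        ring
      · -- no pattern at the top: the stack just grows
        have hstep : solStep (cnt, stack) ing = (cnt, stack ++ [ing]) := by
          simp only [solStep]
          rw [if_neg hg]
        have hnone : findPat (stack ++ [ing]) = none := by
          apply (findPat_none_iff _).mpr
          intro i hi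
          have hle := occ_length hi
          simp at hle
          by_cases hcase : i + 4 ≤ stack.length
          · exact hs i ((occ_append _ hcase).mp hi)
          · -- the occurrence is the last four elements: the guard would have fired
            have hi4 : i + 4 = stack.length + 1 := by omega
            have hlen4 : 4 ≤ (stack ++ [ing]).length := by simp; omega
            apply hg
            refine ⟨hlen4, (guard_iff _ hlen4).mpr ?_⟩
            have : (stack ++ [ing]).length - 4 = i := by simp; omega
            rw [this]
            have hdl : ((stack ++ [ing]).drop i).length = 4 := by
              simp [List.length_drop]; omega
            have := hi
            unfold occ at this
            rwa [List.take_of_length_le (by omega)] at this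
        rw [hstep, ih _ cnt hnone]
        simp

-- ===== VERDICT (by name: the statement is the Claim_ definition above) =====
theorem solution_spec : Claim_equal_solution := by
  intro ingredient _
  unfold Spec_solution solution solution_alt
  simpa using loop_eq ingredient [] 0 rfl
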